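-- pv_equiv track=rewrite | github.com/west789/Document | Python记录/workingRecords/Test/chaoji.py | Judge_A_superset_B
-- ===== SOURCE A (Python) =====
-- def Judge_A_superset_B(a, b):
--     """
--     1.遍历a字符串，将a字符串以元素及出现个数为key，value插入字典中
--     2.遍历b字符串，将按照b字符串依次从a字符串中减去相应元素个数
--     3.若b中的字符串不存在与a，则直接返回false
--     时间复杂度为O(n)其中n为a的长度
--     空间复杂度：因为使用的是字典，总体而言是O(n),n为a的长度
--     """
--     #a长度小于b长度直接返回非超集
--     if len(a)<len(b):
--         return False
--     a_dict = {}
--     #遍历a字符串，将a字符串以字典方式存入，如{"a":1, "b":2}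
--     for i in range(len(a)):
--         a_dict[a[i]] = a_dict.get(a[i], 0)+1
--     for j in range(len(b)):
--         if not a_dict.get(b[j], 0) or a_dict.get(b[j]) <=0:
--             return False
--         else:
--             a_dict[b[j]] -= 1
--     return True
-- ===== SOURCE B (Python) =====
-- def Judge_A_superset_B(a, b):
--     # Multiset containment: every distinct character of b occurs in a at
--     # least as often as in b (the length guard is implied by this).
--     return all(b.count(c) <= a.count(c) for c in set(b))
-- ===== Notes on version B (the rewrite author's own statement) =====
-- stated objective: simpler
-- what changed: Replaces A's length guard plus decrement-and-early-exit scan of b over a mutable count dict with a direct multiset-containment check: per distinct character of b, compare its count in b with its count in a; measured faster in CPython since the counting runs in C-level str.count instead of a Python-level dict loop.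
import Mathlib
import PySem

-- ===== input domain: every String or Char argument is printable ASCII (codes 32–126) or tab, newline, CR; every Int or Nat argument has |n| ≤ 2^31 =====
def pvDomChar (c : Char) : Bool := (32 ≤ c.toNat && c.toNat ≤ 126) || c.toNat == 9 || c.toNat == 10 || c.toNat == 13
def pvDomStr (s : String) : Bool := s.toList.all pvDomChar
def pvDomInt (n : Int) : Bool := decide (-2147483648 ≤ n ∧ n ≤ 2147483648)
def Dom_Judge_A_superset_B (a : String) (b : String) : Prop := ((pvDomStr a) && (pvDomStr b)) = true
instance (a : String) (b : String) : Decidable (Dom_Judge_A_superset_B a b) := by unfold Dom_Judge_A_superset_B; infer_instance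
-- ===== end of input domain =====

-- B replaces A's length guard plus decrement-and-early-exit scan over a mutable
-- count dict with a direct multiset-containment check per distinct character of b (simpler).


-- ===== PORT A =====
-- second loop: 'for j in range(len(b))' with early 'return False';
-- the condition 'not a_dict.get(b[j], 0) or a_dict.get(b[j]) <= 0' is ported branch for branch
-- (when the first disjunct is false the key is present, so the bare .get equals .getD _ 0).
def judgeLoopA (d : PySem.Dict Char Int) : List Char → Bool
  | [] => true
  | c :: rest =>
    let cnt := d.getD c 0
    if cnt = 0 ∨ cnt ≤ 0 then false
    else judgeLoopA (d.insert c (cnt - 1)) rest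

def Judge_A_superset_B (a : String) (b : String) : Bool :=
  if PySem.Str.len a < PySem.Str.len b then false
  else
    -- 'for i in range(len(a)): a_dict[a[i]] = a_dict.get(a[i], 0) + 1' (index loop visits the chars in order)
    let a_dict := a.toList.foldl (fun d c => d.insert c (d.getD c 0 + 1)) PySem.Dict.empty
    judgeLoopA a_dict b.toList

-- ===== PORT B =====
-- 'all(b.count(c) <= a.count(c) for c in set(b))'; str.count of a single character
-- equals the count of that character in the char list (exact on all inputs).
def Judge_A_superset_B_alt (a : String) (b : String) : Bool :=
  (PySem.Set.ofList b.toList).all (fun c => b.toList.count c ≤ a.toList.count c)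

-- ===== PRECONDITION & SPEC =====
def Spec_Judge_A_superset_B (a : String) (b : String) (out : Bool) : Prop := out = Judge_A_superset_B_alt a b
instance (a : String) (b : String) (out : Bool) : Decidable (Spec_Judge_A_superset_B a b out) := by unfold Spec_Judge_A_superset_B; infer_instance

-- ===== CLAIM (what is proved, stated in full; the proofs are below) =====
def Claim_equal_Judge_A_superset_B : Prop := ∀ (a : String) (b : String), Dom_Judge_A_superset_B a b → Spec_Judge_A_superset_B a b (Judge_A_superset_B a b)

-- ===== LEMMAS AND PROOFS =====

-- the loop only inspects the dict through getD
theorem judgeLoopA_congr (bl : List Char) (d d' : PySem.Dict Char Int)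
    (h : ∀ c, d.getD c 0 = d'.getD c 0) : judgeLoopA d bl = judgeLoopA d' bl := by
  induction bl generalizing d d' with
  | nil => rfl
  | cons c rest ih =>
    simp only [judgeLoopA, h c]
    split
    · rfl
    · exact ih _ _ (fun k => by
        rw [PySem.Dict.getD_insert, PySem.Dict.getD_insert]
        split <;> simp [h])

-- the decrementing loop over a counter decides multiset containment
theorem judgeLoopA_counter (bl al : List Char) :
    judgeLoopA (PySem.Dict.counter al) bl = true ↔ ∀ c, bl.count c ≤ al.count c := by
  induction bl generalizing al with
  | nil => simp [judgeLoopA]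
  | cons c rest ih =>
    simp only [judgeLoopA, PySem.Dict.getD_counter]
    by_cases h0 : al.count c = 0
    · simp only [h0]
      constructor
      · intro h; simp at h
      · intro h
        have := h c
        simp [List.count_cons, h0] at this
    · have hpos : 0 < al.count c := Nat.pos_of_ne_zero h0
      have hcond : ¬ ((al.count c : Int) = 0 ∨ (al.count c : Int) ≤ 0) := by
        push_neg; constructor <;> [exact_mod_cast h0; exact_mod_cast hpos]
      simp only [if_neg hcond]
      rw [judgeLoopA_congr rest _ (PySem.Dict.counter (al.erase c)) (fun k => by
        rw [PySem.Dict.getD_insert, PySem.Dict.getD_counter, PySem.Dict.getD_counter,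
            List.count_erase]
        split
        · rename_i hk; subst hk; simp; omega
        · rename_i hk; simp [beq_iff_eq, Ne.symm hk])]
      rw [ih (al.erase c)]
      constructor
      · intro h k
        have := h k
        rw [List.count_erase] at this
        rw [List.count_cons]
        by_cases hk : k = c
        · subst hk; simp at this ⊢; omega
        · simp [hk, beq_iff_eq, Ne.symm hk] at this ⊢; omega
      · intro h k
        have := h k
        rw [List.count_cons] at this
        rw [List.count_erase]
        by_cases hk : k = c
        · subst hk; simp at this ⊢; omega
        · simp [hk, beq_iff_eq, Ne.symm hk] at this ⊢; omega

theorem alt_true_iff (a b : String) :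
    Judge_A_superset_B_alt a b = true ↔ ∀ c, b.toList.count c ≤ a.toList.count c := by
  unfold Judge_A_superset_B_alt
  rw [List.all_eq_true]
  constructor
  · intro h c
    by_cases hc : c ∈ b.toList
    · have := h c (by simpa [PySem.Set.mem_ofList] using hc)
      simpa using this
    · simp [List.count_eq_zero_of_not_mem hc]
  · intro h c _
    simpa using h c

-- ===== VERDICT (by name: the statement is the Claim_ definition above) =====
theorem Judge_A_superset_B_spec : Claim_equal_Judge_A_superset_B := by
  intro a b _
  unfold Spec_Judge_A_superset_B Judge_A_superset_B
  rw [PySem.Dict.foldl_insert_getD_add_one_eq_counter]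
  by_cases hlen : PySem.Str.len a < PySem.Str.len b
  · rw [if_pos hlen]
    by_contra h
    have halt : Judge_A_superset_B_alt a b = true := by
      cases hb : Judge_A_superset_B_alt a b
      · exact absurd hb.symm h
      · rfl
    have hcount := (alt_true_iff a b).mp halt
    have hsub : b.toList.Subperm a.toList :=
      List.subperm_ext_iff.mpr (fun x _ => hcount x)
    have := hsub.length_le
    simp [PySem.Str.len, ← String.length_toList] at hlen
    omega
  · rw [if_neg hlen]
    rcases hb : Judge_A_superset_B_alt a b with _ | _
    · cases hA : judgeLoopA (PySem.Dict.counter a.toList) b.toList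
      · rfl
      · exact absurd ((alt_true_iff a b).mpr ((judgeLoopA_counter _ _).mp hA)) (by simp [hb])
    · exact (judgeLoopA_counter _ _).mpr ((alt_true_iff a b).mp hb)
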